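-- pv_equiv track=rewrite | github.com/saagie/api-saagie | saagieapi/apps/apps.py | check_exposed_ports
-- ===== SOURCE A (Python) =====
-- from typing import Dict, List, Optional
--
-- LIST_EXPOSED_PORT_FIELD = ["basePathVariableName", "isRewriteUrl", "scope", "number", "name"]
--
-- LIST_EXPOSED_PORT_MANDATORY = ["isRewriteUrl", "scope", "number"]
--
-- def check_exposed_ports(exposed_ports: List[Dict]):
--     """
--     Check if exposed ports are valid
--
--     Parameters
--     ----------
--     exposed_ports: List[Dict]
--         List of exposed ports, each item of the list should be a dict and each dict must have
--         'number' (int), 'scope' ('GLOBAL' or 'PROJECT'), and 'isRewriteUrl' (Boolean) as key,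
--         and only contain valid keys
--
--     Returns
--     -------
--     bool
--         True if all exposed port are in a valid format
--         False otherwise
--     """
--
--     return bool(
--         isinstance(exposed_ports, List)  # Exposed_ports is a list
--         and exposed_ports  # Exposed_ports is not empty
--         and all(isinstance(ep, Dict) for ep in exposed_ports)  # Exposed_ports is a list of dict
--         # Mandatory keys are present in each dict
--         and all((LIST_EXPOSED_PORT_MANDATORY - ep.keys()) == set() for ep in exposed_ports)
--         # All keys are valid
--         and all(set(ep.keys()).issubset(LIST_EXPOSED_PORT_FIELD) for ep in exposed_ports)
--     )
-- ===== SOURCE B (Python) =====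
-- from typing import Dict, List
--
-- LIST_EXPOSED_PORT_FIELD = ["basePathVariableName", "isRewriteUrl", "scope", "number", "name"]
--
-- LIST_EXPOSED_PORT_MANDATORY = ["isRewriteUrl", "scope", "number"]
--
-- _KEY_BIT = {"basePathVariableName": 1, "isRewriteUrl": 2, "scope": 4, "number": 8, "name": 16}
-- _MANDATORY_MASK = 2 | 4 | 8  # isRewriteUrl | scope | number
--
--
-- def check_exposed_ports(exposed_ports: List[Dict]):
--     """Bitmask validation: each allowed key is encoded as one bit; an unknown key
--     fails immediately, and the or-ed mask must cover the three mandatory bits."""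
--     if not isinstance(exposed_ports, list) or not exposed_ports:
--         return False
--     for ep in exposed_ports:
--         if not isinstance(ep, dict):
--             return False
--         mask = 0
--         for k in ep:
--             bit = _KEY_BIT.get(k, 0)
--             if bit == 0:
--                 return False
--             mask |= bit
--         if mask & _MANDATORY_MASK != _MANDATORY_MASK:
--             return False
--     return True
-- ===== Notes on version B (the rewrite author's own statement) =====
-- stated objective: alternative
-- what changed: Replaces A's three set-algebra all() scans (set difference against mandatory keys, subset test against valid keys) with a bitmask scheme: each allowed key is mapped to a bit by a lookup table, an unknown key aborts, and mandatory-key presence becomes a single mask-and comparison.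
import Mathlib
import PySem

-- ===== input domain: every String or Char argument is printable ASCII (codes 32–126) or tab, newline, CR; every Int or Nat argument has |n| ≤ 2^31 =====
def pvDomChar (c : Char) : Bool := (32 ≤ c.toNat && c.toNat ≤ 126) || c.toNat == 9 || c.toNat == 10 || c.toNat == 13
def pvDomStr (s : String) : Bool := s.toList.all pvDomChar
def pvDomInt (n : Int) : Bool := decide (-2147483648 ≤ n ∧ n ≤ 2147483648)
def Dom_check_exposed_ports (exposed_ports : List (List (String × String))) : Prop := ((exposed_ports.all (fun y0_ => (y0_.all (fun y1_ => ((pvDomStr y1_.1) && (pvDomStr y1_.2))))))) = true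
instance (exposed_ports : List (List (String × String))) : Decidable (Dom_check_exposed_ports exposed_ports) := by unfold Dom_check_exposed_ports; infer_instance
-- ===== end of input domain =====

-- B replaces A's three set-algebra scans by a bitmask scheme: each allowed key maps to a bit
-- via a lookup table, an unknown key fails at once, and the mandatory keys are checked by one
-- mask comparison (objective: alternative).

def LIST_EXPOSED_PORT_FIELD : List String :=
  ["basePathVariableName", "isRewriteUrl", "scope", "number", "name"]

def LIST_EXPOSED_PORT_MANDATORY : List String :=
  ["isRewriteUrl", "scope", "number"]

-- ===== PORT A =====
-- isinstance(exposed_ports, List) and isinstance(ep, Dict) are always true under the type convention.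
def check_exposed_ports (exposed_ports : List (List (String × String))) : Bool :=
  (decide (exposed_ports ≠ []))
  && exposed_ports.all (fun _ => true)  -- all(isinstance(ep, Dict) …)
  -- (LIST_EXPOSED_PORT_MANDATORY - ep.keys()) == set()
  && exposed_ports.all (fun ep =>
       PySem.Set.equal
         (PySem.Set.diff (PySem.Set.ofList LIST_EXPOSED_PORT_MANDATORY)
           (PySem.Dict.keys (PySem.Dict.ofList ep)))
         PySem.Set.empty)
  -- set(ep.keys()).issubset(LIST_EXPOSED_PORT_FIELD)
  && exposed_ports.all (fun ep =>
       PySem.Set.issubset (PySem.Set.ofList (PySem.Dict.keys (PySem.Dict.ofList ep)))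
         LIST_EXPOSED_PORT_FIELD)

-- ===== PORT B =====
-- _KEY_BIT
def KEY_BIT : PySem.Dict String Nat :=
  PySem.Dict.ofList [("basePathVariableName", 1), ("isRewriteUrl", 2), ("scope", 4), ("number", 8), ("name", 16)]

-- _KEY_BIT.get(k, 0)
def keyBit (k : String) : Nat := PySem.Dict.getD KEY_BIT k 0

-- _MANDATORY_MASK = 2 | 4 | 8
def MANDATORY_MASK : Nat := 2 ||| 4 ||| 8

-- the inner 'for k in ep:' loop: accumulate the mask, early-return (none) on an unknown key
def epMaskLoop (mask : Nat) : List String → Option Nat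
  | [] => some mask
  | k :: rest =>
    let bit := keyBit k
    if bit = 0 then none else epMaskLoop (mask ||| bit) rest

-- the outer 'for ep in exposed_ports:' loop with its early returns
def check_exposed_ports_loop : List (List (String × String)) → Bool
  | [] => true
  | ep :: rest =>
    match epMaskLoop 0 (PySem.Dict.keys (PySem.Dict.ofList ep)) with
    | none => false
    | some mask =>
      if mask &&& MANDATORY_MASK ≠ MANDATORY_MASK then false
      else check_exposed_ports_loop rest

def check_exposed_ports_alt (exposed_ports : List (List (String × String))) : Bool :=
  if exposed_ports = [] then false
  else check_exposed_ports_loop exposed_ports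

-- ===== PRECONDITION & SPEC =====
def Spec_check_exposed_ports (exposed_ports : List (List (String × String))) (out : Bool) : Prop := out = check_exposed_ports_alt exposed_ports
instance (exposed_ports : List (List (String × String))) (out : Bool) : Decidable (Spec_check_exposed_ports exposed_ports out) := by unfold Spec_check_exposed_ports; infer_instance

-- ===== CLAIM (what is proved, stated in full; the proofs are below) =====
def Claim_equal_check_exposed_ports : Prop := ∀ (exposed_ports : List (List (String × String))), Dom_check_exposed_ports exposed_ports → Spec_check_exposed_ports exposed_ports (check_exposed_ports exposed_ports)

-- ===== LEMMAS AND PROOFS =====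

-- the literal dict of B is the chain of inserts
theorem KEY_BIT_eq_inserts : KEY_BIT =
    ((((PySem.Dict.empty.insert "basePathVariableName" 1).insert "isRewriteUrl" 2).insert
        "scope" 4).insert "number" 8).insert "name" 16 := by
  rfl

theorem keyBit_eq (k : String) : keyBit k =
    if k = "name" then 16 else if k = "number" then 8 else if k = "scope" then 4
    else if k = "isRewriteUrl" then 2 else if k = "basePathVariableName" then 1 else 0 := by
  rw [keyBit, KEY_BIT_eq_inserts]
  simp [PySem.Dict.getD_insert, PySem.Dict.getD_empty]

-- an unknown key is exactly a key with bit 0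
theorem keyBit_ne_zero_iff (k : String) : keyBit k ≠ 0 ↔ k ∈ LIST_EXPOSED_PORT_FIELD := by
  rw [keyBit_eq]
  split_ifs <;> simp_all [LIST_EXPOSED_PORT_FIELD]

theorem keyBit_testBit_one (k : String) : (keyBit k).testBit 1 = decide (k = "isRewriteUrl") := by
  rw [keyBit_eq]; split_ifs <;> simp_all <;> decide

theorem keyBit_testBit_two (k : String) : (keyBit k).testBit 2 = decide (k = "scope") := by
  rw [keyBit_eq]; split_ifs <;> simp_all <;> decide

theorem keyBit_testBit_three (k : String) : (keyBit k).testBit 3 = decide (k = "number") := by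
  rw [keyBit_eq]; split_ifs <;> simp_all <;> decide

-- the inner loop fails iff some key is unknown
theorem epMaskLoop_eq_none_iff (ks : List String) : ∀ mask,
    (epMaskLoop mask ks = none ↔ ∃ k ∈ ks, keyBit k = 0) := by
  induction ks with
  | nil => intro mask; simp [epMaskLoop]
  | cons k rest ih =>
    intro mask
    simp only [epMaskLoop, List.mem_cons]
    by_cases h : keyBit k = 0
    · simp [h]
    · simp [h, ih]

-- on all-known keys the inner loop ORs the bits onto the accumulator
theorem epMaskLoop_eq_some (ks : List String) : ∀ mask, (∀ k ∈ ks, keyBit k ≠ 0) →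
    epMaskLoop mask ks = some (ks.foldl (fun a k => a ||| keyBit k) mask) := by
  induction ks with
  | nil => intro mask _; rfl
  | cons k rest ih =>
    intro mask h
    have hk : keyBit k ≠ 0 := h k (by simp)
    simp only [epMaskLoop, hk, List.foldl_cons]
    exact ih _ (fun x hx => h x (by simp [hx]))

theorem foldl_or_testBit (ks : List String) (i : Nat) : ∀ mask,
    (ks.foldl (fun a k => a ||| keyBit k) mask).testBit i
      = (mask.testBit i || ks.any (fun k => (keyBit k).testBit i)) := by
  induction ks with
  | nil => intro mask; simp
  | cons k rest ih =>
    intro mask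
    simp [ih, Nat.testBit_or, Bool.or_assoc]

-- the mask check is the three mandatory bits
theorem and_fourteen_iff (m : Nat) :
    m &&& 14 = 14 ↔ (m.testBit 1 = true ∧ m.testBit 2 = true ∧ m.testBit 3 = true) := by
  constructor
  · intro h
    have e1 : Nat.testBit 14 1 = true := by decide
    have e2 : Nat.testBit 14 2 = true := by decide
    have e3 : Nat.testBit 14 3 = true := by decide
    refine ⟨?_, ?_, ?_⟩
    · have := congrArg (fun x => Nat.testBit x 1) h
      simpa [Nat.testBit_and, e1] using this
    · have := congrArg (fun x => Nat.testBit x 2) h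
      simpa [Nat.testBit_and, e2] using this
    · have := congrArg (fun x => Nat.testBit x 3) h
      simpa [Nat.testBit_and, e3] using this
  · rintro ⟨h1, h2, h3⟩
    apply Nat.eq_of_testBit_eq
    intro i
    match i with
    | 0 => simp
    | 1 => simp [Nat.testBit_and, h1]
    | 2 => simp [Nat.testBit_and, h2]
    | 3 => simp [Nat.testBit_and, h3]
    | (i + 4) =>
      have h14 : (14 : Nat).testBit (i + 4) = false := by
        apply Nat.testBit_eq_false_of_lt
        calc (14 : Nat) < 2 ^ 4 := by decide
        _ ≤ 2 ^ (i + 4) := Nat.pow_le_pow_right (by decide) (by omega)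
      simp [Nat.testBit_and, h14]

-- A's "(MANDATORY - keys) == set()" is "set(MANDATORY).issubset(keys)"
theorem diff_empty_eq_issubset (ks : List String) :
    PySem.Set.equal
      (PySem.Set.diff (PySem.Set.ofList LIST_EXPOSED_PORT_MANDATORY) ks) PySem.Set.empty
    = PySem.Set.issubset (PySem.Set.ofList LIST_EXPOSED_PORT_MANDATORY) ks := by
  rw [Bool.eq_iff_iff, PySem.Set.equal_iff, PySem.Set.issubset_iff]
  simp only [PySem.Set.mem_diff, PySem.Set.empty, List.not_mem_nil, iff_false, not_and, not_not]

-- per-element bridge: B's bitmask test equals A's two set conditions on the same key list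
theorem elem_bridge (ks : List String) :
    (match epMaskLoop 0 ks with
     | none => false
     | some m => decide (m &&& MANDATORY_MASK = MANDATORY_MASK))
    = (PySem.Set.issubset (PySem.Set.ofList LIST_EXPOSED_PORT_MANDATORY) ks
       && PySem.Set.issubset (PySem.Set.ofList ks) LIST_EXPOSED_PORT_FIELD) := by
  have hmm : MANDATORY_MASK = 14 := by decide
  by_cases hvalid : ∀ k ∈ ks, keyBit k ≠ 0
  · rw [epMaskLoop_eq_some ks 0 hvalid]
    have hsub2 : PySem.Set.issubset (PySem.Set.ofList ks) LIST_EXPOSED_PORT_FIELD = true := by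
      rw [PySem.Set.issubset_iff]
      intro x hx
      rw [PySem.Set.mem_ofList] at hx
      exact (keyBit_ne_zero_iff x).mp (hvalid x hx)
    rw [hsub2, Bool.and_true, hmm]
    rw [Bool.eq_iff_iff, decide_eq_true_iff, and_fourteen_iff, PySem.Set.issubset_iff]
    simp only [foldl_or_testBit, Nat.zero_testBit, Bool.false_or,
      keyBit_testBit_one, keyBit_testBit_two, keyBit_testBit_three,
      List.any_eq_true, decide_eq_true_iff, exists_eq_right,
      PySem.Set.mem_ofList, LIST_EXPOSED_PORT_MANDATORY]
    constructor
    · rintro ⟨h1, h2, h3⟩ x hx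
      simp only [List.mem_cons, List.not_mem_nil, or_false] at hx
      rcases hx with h | h | h <;> subst h <;> assumption
    · intro h
      exact ⟨h _ (by simp), h _ (by simp), h _ (by simp)⟩
  · push_neg at hvalid
    obtain ⟨k, hk, hk0⟩ := hvalid
    rw [(epMaskLoop_eq_none_iff ks 0).mpr ⟨k, hk, hk0⟩]
    have : PySem.Set.issubset (PySem.Set.ofList ks) LIST_EXPOSED_PORT_FIELD = false := by
      rw [← Bool.not_eq_true, PySem.Set.issubset_iff]
      intro hall
      exact ((keyBit_ne_zero_iff k).mpr (hall k ((PySem.Set.mem_ofList ks k).mpr hk))) hk0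
    simp [this]

-- all distributes over a pointwise conjunction
theorem all_and_split {T : Type} (l : List T) (f g : T → Bool) :
    (l.all f && l.all g) = l.all (fun x => f x && g x) := by
  induction l with
  | nil => rfl
  | cons a t ih =>
    cases hf : f a <;> cases hg : g a <;> simp [List.all_cons, hf, hg, ← ih]

-- the early-exit outer loop equals the conjunction of the per-element tests
theorem loop_eq_all (l : List (List (String × String))) :
    check_exposed_ports_loop l
      = l.all (fun ep =>
          match epMaskLoop 0 (PySem.Dict.keys (PySem.Dict.ofList ep)) with
          | none => false
          | some m => decide (m &&& MANDATORY_MASK = MANDATORY_MASK)) := by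
  induction l with
  | nil => rfl
  | cons ep rest ih =>
    simp only [check_exposed_ports_loop, List.all_cons, ih]
    cases h : epMaskLoop 0 (PySem.Dict.keys (PySem.Dict.ofList ep)) with
    | none => simp
    | some m =>
      by_cases hm : m &&& MANDATORY_MASK = MANDATORY_MASK <;> simp [hm]

-- ===== VERDICT (by name: the statement is the Claim_ definition above) =====
theorem check_exposed_ports_spec : Claim_equal_check_exposed_ports := by
  intro eps _
  unfold Spec_check_exposed_ports check_exposed_ports check_exposed_ports_alt
  by_cases hnil : eps = []
  · simp [hnil]
  · simp only [hnil, if_false, ne_eq, not_false_eq_true, decide_true, Bool.true_and,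
      loop_eq_all]
    have h : (eps.all fun _ => true) = true := by simp
    rw [h, Bool.true_and, all_and_split]
    refine congrArg _ (funext fun ep => ?_)
    rw [elem_bridge, diff_empty_eq_issubset]
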